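-- pv_equiv track=rewrite | github.com/Adrian-Obungu/mitre-attack-python-lab | src/reconnaissance/tcp_connect_scan.py | validate_and_parse_ports
-- ===== SOURCE A (Python) =====
-- from typing import List, Optional
--
-- def validate_and_parse_ports(ports_str: str) -> Optional[List[int]]:
--     """
--     Parses a flexible port string and validates port numbers.
--     Handles single ports ("22"), ranges ("1-100"), comma-separated lists ("80,443"),
--     and mixed formats ("22,80-82,443").
--     Returns a sorted list of unique, valid ports or None if validation fails.
--     """
--     ports_to_scan: set[int] = set()
--     try:
--         # Split by comma for lists of ports/ranges
--         parts = ports_str.split(',')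
--         for part in parts:
--             part = part.strip()
--             if not part:
--                 continue
--             if "-" in part:
--                 # It's a range
--                 start, end = map(int, part.split('-'))
--                 if not (1 <= start <= end <= 65535):
--                     return None  # Invalid range or port number
--                 ports_to_scan.update(range(start, end + 1))
--             else:
--                 # It's a single port
--                 port = int(part)
--                 if not (1 <= port <= 65535):
--                     return None  # Invalid port number
--                 ports_to_scan.add(port)
--     except ValueError:
--         return None  # Happens if int() conversion fails
--
--     if not ports_to_scan:
--         return None
--
--     return sorted(list(ports_to_scan))
-- ===== SOURCE B (Python) =====
-- def _part_bounds(part):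
--     """Return (lo, hi) read from a stripped part, or None if it cannot be parsed."""
--     if '-' in part:
--         pieces = part.split('-')
--         if len(pieces) != 2:
--             return None
--         try:
--             return int(pieces[0]), int(pieces[1])
--         except ValueError:
--             return None
--     try:
--         p = int(part)
--     except ValueError:
--         return None
--     return p, p
--
--
-- def validate_and_parse_ports(ports_str):
--     # Bitmap of present ports instead of a set: marking ranges is a slice write
--     # and the final scan of the bitmap yields the sorted unique list directly.
--     present = bytearray(65536)
--     for part in ports_str.split(','):
--         part = part.strip()
--         if not part:
--             continue
--         bounds = _part_bounds(part)
--         if bounds is None: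
--             return None
--         lo, hi = bounds
--         if not (1 <= lo <= hi <= 65535):
--             return None
--         present[lo:hi + 1] = b'\x01' * (hi + 1 - lo)
--     result = [p for p in range(1, 65536) if present[p]]
--     return result if result else None
-- ===== Notes on version B (the rewrite author's own statement) =====
-- stated objective: alternative
-- what changed: Replaces the set + sorted() with a 65536-entry presence bitmap (range marks become slice writes, a single port a range of length 1 via a shared _part_bounds helper) and builds the sorted unique result by one scan of the bitmap, never calling sorted().
import Mathlib
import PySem

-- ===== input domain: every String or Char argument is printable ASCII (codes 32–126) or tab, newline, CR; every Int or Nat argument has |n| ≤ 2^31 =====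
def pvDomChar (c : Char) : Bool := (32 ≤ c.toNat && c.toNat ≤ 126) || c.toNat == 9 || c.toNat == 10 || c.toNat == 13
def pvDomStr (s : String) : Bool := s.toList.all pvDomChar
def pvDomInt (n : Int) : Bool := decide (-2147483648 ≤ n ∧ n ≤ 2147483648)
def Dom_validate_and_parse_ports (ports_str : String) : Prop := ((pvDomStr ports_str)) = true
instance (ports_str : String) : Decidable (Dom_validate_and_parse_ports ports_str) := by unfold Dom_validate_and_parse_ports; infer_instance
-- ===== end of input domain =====

-- B replaces A's set + sorted() with a 65536-entry presence bitmap scanned once in order; equal return value on all inputs.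

-- ===== PORT A =====
-- A's for-loop over the comma-split parts; state = the set ports_to_scan; none = a 'return None' taken inside the loop/try
def pvGoA : List (List Char) → PySem.Set Int → Option (PySem.Set Int)
  | [], acc => some acc
  | part :: rest, acc =>
    let p := PySem.Chars.strip part
    if p = [] then pvGoA rest acc
    else if PySem.Chars.isIn ['-'] p then
      match PySem.Chars.splitOn p ['-'] with
      | [a, b] =>
        match PySem.Int.ofChars? a, PySem.Int.ofChars? b with
        | some st, some en =>
          if 1 ≤ st ∧ st ≤ en ∧ en ≤ 65535 then
            pvGoA rest (acc.update (PySem.List.pyRange st (en + 1)))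
          else none
        | _, _ => none
      -- 'start, end = map(int, …)' with ≠ 2 pieces raises ValueError (from an int() or from the
      -- unpacking itself, whichever comes first), caught → return None; exact either way
      | _ => none
    else
      match PySem.Int.ofChars? p with
      | some port =>
        if 1 ≤ port ∧ port ≤ 65535 then pvGoA rest (acc.add port) else none
      | none => none

def validate_and_parse_ports (ports_str : String) : Option (List Int) :=
  match pvGoA (PySem.Chars.splitOn ports_str.toList [',']) (PySem.Set.ofList []) with
  | none => none
  | some s => if s = [] then none else some (PySem.List.sorted s (fun x => x))

-- ===== PORT B =====
-- _part_bounds: (lo, hi) read from a stripped part, or none if it cannot be parsed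
def pvPartBounds (p : List Char) : Option (Int × Int) :=
  if PySem.Chars.isIn ['-'] p then
    match PySem.Chars.splitOn p ['-'] with
    | [a, b] =>
      match PySem.Int.ofChars? a, PySem.Int.ofChars? b with
      | some lo, some hi => some (lo, hi)
      | _, _ => none
    | _ => none
  else
    match PySem.Int.ofChars? p with
    | some q => some (q, q)
    | none => none

-- present[lo:hi+1] = b'\x01' * (hi+1-lo): mark every index of the slice (exact: 0 ≤ lo ≤ hi < size at the call site)
def pvMarkRange (arr : Array Bool) (lo hi : Int) : Array Bool :=
  (PySem.List.pyRange lo (hi + 1)).foldl (fun a q => a.setIfInBounds q.toNat true) arr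

-- B's for-loop over the comma-split parts; state = the bytearray 'present'
def pvGoB : List (List Char) → Array Bool → Option (Array Bool)
  | [], arr => some arr
  | part :: rest, arr =>
    let p := PySem.Chars.strip part
    if p = [] then pvGoB rest arr
    else
      match pvPartBounds p with
      | none => none
      | some (lo, hi) =>
        if 1 ≤ lo ∧ lo ≤ hi ∧ hi ≤ 65535 then pvGoB rest (pvMarkRange arr lo hi) else none

def validate_and_parse_ports_alt (ports_str : String) : Option (List Int) :=
  match pvGoB (PySem.Chars.splitOn ports_str.toList [',']) (Array.replicate 65536 false) with
  | none => none
  | some present =>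
    let result := (PySem.List.pyRange 1 65536).filter (fun q => present.getD q.toNat false)
    if result = [] then none else some result

-- ===== PRECONDITION & SPEC =====
def Spec_validate_and_parse_ports (ports_str : String) (out : Option (List Int)) : Prop := out = validate_and_parse_ports_alt ports_str
instance (ports_str : String) (out : Option (List Int)) : Decidable (Spec_validate_and_parse_ports ports_str out) := by unfold Spec_validate_and_parse_ports; infer_instance

-- ===== CLAIM (what is proved, stated in full; the proofs are below) =====
def Claim_equal_validate_and_parse_ports : Prop := ∀ (ports_str : String), Dom_validate_and_parse_ports ports_str → Spec_validate_and_parse_ports ports_str (validate_and_parse_ports ports_str)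

-- ===== LEMMAS AND PROOFS =====

lemma pv_getD_setIfInBounds (arr : Array Bool) (i j : Nat) (hi : i < arr.size) :
    (arr.setIfInBounds i true).getD j false = if j = i then true else arr.getD j false := by
  simp [Array.getD_eq_getD_getElem?, Array.getElem?_setIfInBounds]
  split_ifs with h1 <;> simp_all [eq_comm]

lemma pv_size_fold (L : List Int) : ∀ (arr : Array Bool),
    (L.foldl (fun a q => a.setIfInBounds q.toNat true) arr).size = arr.size := by
  induction L with
  | nil => intro arr; rfl
  | cons x t ih => intro arr; simp [List.foldl_cons, ih, Array.size_setIfInBounds]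

lemma pv_fold_getD (n : Nat) : ∀ (lo : Int) (arr : Array Bool) (j : Nat), 0 ≤ lo →
    lo + n ≤ (arr.size : Int) →
    (((PySem.List.pyRange lo (lo + n)).foldl (fun a q => a.setIfInBounds q.toNat true) arr).getD j false = true ↔
      (lo ≤ (j : Int) ∧ (j : Int) < lo + n) ∨ arr.getD j false = true) := by
  induction n with
  | zero =>
    intro lo arr j h0 hub
    rw [PySem.List.pyRange_one_eq_nil (by push_cast; omega)]
    simp
  | succ n ih =>
    intro lo arr j h0 hub
    rw [PySem.List.pyRange_one_cons (by push_cast; omega)]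
    have harr : lo + ((n : Int) + 1) = (lo + 1) + (n : Int) := by ring
    push_cast
    rw [harr]
    rw [List.foldl_cons]
    rw [ih (lo + 1) (arr.setIfInBounds lo.toNat true) j (by omega)
        (by rw [Array.size_setIfInBounds]; push_cast at hub ⊢; omega)]
    rw [pv_getD_setIfInBounds arr lo.toNat j (by push_cast at hub; omega)]
    by_cases hj : j = lo.toNat
    · simp [hj]; omega
    · simp [hj]; constructor
      · rintro (h | h)
        · left; omega
        · right; exact h
      · rintro (h | h)
        · left; omega
        · right; exact h

lemma pv_size_markRange (arr : Array Bool) (lo hi : Int) :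
    (pvMarkRange arr lo hi).size = arr.size := pv_size_fold _ arr

lemma pv_markRange_getD (arr : Array Bool) (lo hi : Int) (j : Nat)
    (h0 : 0 ≤ lo) (hub : hi < (arr.size : Int)) :
    ((pvMarkRange arr lo hi).getD j false = true ↔
      (lo ≤ (j : Int) ∧ (j : Int) ≤ hi) ∨ arr.getD j false = true) := by
  unfold pvMarkRange
  by_cases hle : lo ≤ hi
  · have hn : hi + 1 = lo + ((hi + 1 - lo).toNat : Int) := by omega
    rw [hn, pv_fold_getD (hi + 1 - lo).toNat lo arr j h0 (by omega)]
    have h2 : lo + (((hi + 1 - lo).toNat : Int)) = hi + 1 := by omega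
    rw [h2]
    simp
  · rw [PySem.List.pyRange_one_eq_nil (by omega)]
    simp; omega

-- the loop invariant: the set and the bitmap hold exactly the same ports, or both loops bail out
lemma pv_go_equiv (parts : List (List Char)) : ∀ (s : PySem.Set Int) (arr : Array Bool),
    arr.size = 65536 → List.Nodup s →
    (∀ q : Int, q ∈ s ↔ 1 ≤ q ∧ q ≤ 65535 ∧ arr.getD q.toNat false = true) →
    (pvGoA parts s = none ∧ pvGoB parts arr = none) ∨
    ∃ s' arr', pvGoA parts s = some s' ∧ pvGoB parts arr = some arr' ∧ arr'.size = 65536 ∧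
      List.Nodup s' ∧ ∀ q : Int, q ∈ s' ↔ 1 ≤ q ∧ q ≤ 65535 ∧ arr'.getD q.toNat false = true := by
  induction parts with
  | nil =>
    intro s arr hsz hnd hmem
    exact Or.inr ⟨s, arr, rfl, rfl, hsz, hnd, hmem⟩
  | cons part rest ih =>
    intro s arr hsz hnd hmem
    rw [pvGoA, pvGoB]
    by_cases hp : PySem.Chars.strip part = []
    · rw [if_pos hp, if_pos hp]
      exact ih s arr hsz hnd hmem
    · rw [if_neg hp, if_neg hp]
      unfold pvPartBounds
      by_cases hdash : PySem.Chars.isIn ['-'] (PySem.Chars.strip part) = true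
      · rw [if_pos hdash, if_pos hdash]
        cases hsp : PySem.Chars.splitOn (PySem.Chars.strip part) ['-'] with
        | nil => exact Or.inl ⟨rfl, rfl⟩
        | cons a t =>
          cases t with
          | nil => exact Or.inl ⟨rfl, rfl⟩
          | cons b t2 =>
            cases t2 with
            | cons c t3 => exact Or.inl ⟨rfl, rfl⟩
            | nil =>
              dsimp only
              cases ha : PySem.Int.ofChars? a with
              | none => exact Or.inl ⟨rfl, rfl⟩
              | some st =>
                cases hb : PySem.Int.ofChars? b with
                | none => exact Or.inl ⟨rfl, rfl⟩
                | some en =>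
                  dsimp only
                  by_cases hc : 1 ≤ st ∧ st ≤ en ∧ en ≤ 65535
                  · rw [if_pos hc, if_pos hc]
                    apply ih
                    · rw [pv_size_markRange]; exact hsz
                    · exact PySem.Set.nodup_update s _ hnd
                    · intro q
                      rw [PySem.Set.mem_update]
                      rw [pv_markRange_getD arr st en q.toNat (by omega) (by rw [hsz]; omega)]
                      rw [hmem q]
                      constructor
                      · rintro (⟨h1, h2, h3⟩ | hr)
                        · exact ⟨h1, h2, Or.inr h3⟩
                        · rw [PySem.List.mem_pyRange_one] at hr
                          refine ⟨by omega, by omega, Or.inl ⟨by omega, by omega⟩⟩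
                      · rintro ⟨h1, h2, (⟨h3, h4⟩ | h5)⟩
                        · right; rw [PySem.List.mem_pyRange_one]; omega
                        · left; exact ⟨h1, h2, h5⟩
                  · rw [if_neg hc, if_neg hc]
                    exact Or.inl ⟨rfl, rfl⟩
      · rw [if_neg hdash, if_neg hdash]
        cases hv : PySem.Int.ofChars? (PySem.Chars.strip part) with
        | none => exact Or.inl ⟨rfl, rfl⟩
        | some port =>
          dsimp only
          by_cases hc : 1 ≤ port ∧ port ≤ 65535
          · rw [if_pos hc, if_pos (show 1 ≤ port ∧ port ≤ port ∧ port ≤ 65535 from ⟨hc.1, le_refl _, hc.2⟩)]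
            apply ih
            · rw [pv_size_markRange]; exact hsz
            · exact PySem.Set.nodup_add s port hnd
            · intro q
              rw [PySem.Set.mem_add]
              rw [pv_markRange_getD arr port port q.toNat (by omega) (by rw [hsz]; omega)]
              rw [hmem q]
              constructor
              · rintro (⟨h1, h2, h3⟩ | hq)
                · exact ⟨h1, h2, Or.inr h3⟩
                · refine ⟨by omega, by omega, Or.inl ⟨by omega, by omega⟩⟩
              · rintro ⟨h1, h2, (⟨h3, h4⟩ | h5)⟩
                · right; omega
                · left; exact ⟨h1, h2, h5⟩
          · rw [if_neg hc, if_neg (show ¬(1 ≤ port ∧ port ≤ port ∧ port ≤ 65535) from fun h => hc ⟨h.1, h.2.2⟩)]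
            exact Or.inl ⟨rfl, rfl⟩

-- ===== VERDICT (by name: the statement is the Claim_ definition above) =====
theorem validate_and_parse_ports_spec : Claim_equal_validate_and_parse_ports := by
  intro ports_str _
  unfold Spec_validate_and_parse_ports
  unfold validate_and_parse_ports validate_and_parse_ports_alt
  have h0 : ∀ q : Int, q ∈ (PySem.Set.ofList [] : PySem.Set Int) ↔
      1 ≤ q ∧ q ≤ 65535 ∧ (Array.replicate 65536 false).getD q.toNat false = true := by
    intro q
    simp [Array.getD_eq_getD_getElem?, Array.getElem?_replicate]
    intro _ _
    split <;> simp
  rcases pv_go_equiv (PySem.Chars.splitOn ports_str.toList [','])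
      (PySem.Set.ofList []) (Array.replicate 65536 false)
      (by simp) (by simp [PySem.Set.ofList]) h0 with
    ⟨hA, hB⟩ | ⟨s', arr', hA, hB, hsz', hnd', hinv⟩
  · rw [hA, hB]
  · rw [hA, hB]
    dsimp only
    have hmemr : ∀ q : Int,
        q ∈ (PySem.List.pyRange 1 65536).filter (fun q => arr'.getD q.toNat false) ↔ q ∈ s' := by
      intro q
      rw [List.mem_filter, PySem.List.mem_pyRange_one, hinv q]
      constructor
      · rintro ⟨⟨h1, h2⟩, h3⟩
        exact ⟨by omega, by omega, h3⟩
      · rintro ⟨h1, h2, h3⟩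
        exact ⟨⟨by omega, by omega⟩, h3⟩
    by_cases he : s' = []
    · have hr : (PySem.List.pyRange 1 65536).filter (fun q => arr'.getD q.toNat false) = [] := by
        rw [List.eq_nil_iff_forall_not_mem]
        intro q hq
        rw [he] at hmemr
        exact (List.not_mem_nil) ((hmemr q).mp hq)
      rw [if_pos he]
      rw [if_pos hr]
    · have hr : (PySem.List.pyRange 1 65536).filter (fun q => arr'.getD q.toNat false) ≠ [] := by
        intro hcon
        apply he
        rw [List.eq_nil_iff_forall_not_mem]
        intro q hq
        have := (hmemr q).mpr hq
        rw [hcon] at this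
        exact (List.not_mem_nil) this
      rw [if_neg he]
      rw [if_neg hr]
      exact congrArg some (PySem.List.sorted_eq_of_perm_of_pairwise_lt s' _ (fun x => x)
        ((List.perm_ext_iff_of_nodup ((PySem.List.nodup_pyRange_one 1 65536).filter _) hnd').mpr hmemr)
        ((PySem.List.pairwise_lt_pyRange_one 1 65536).filter _))
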